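-- pv_equiv track=rewrite | github.com/pypi-data/pypi-mirror-376 | packages/orchardseg/orchardseg-0.0.2.tar.gz/orchardseg-0.0.2/src/segtree/utils.py | min_max_reg
-- ===== SOURCE A (Python) =====
-- def min_max_reg(reg_unique_pair,reg_inside_y):
--   borne_mn_y = None
--   borne_mx_y = None
--
--   for ix in reg_unique_pair:
--     y_ = ix[0]
--     if y_ == min(reg_inside_y):
--       borne_mn_y = ix
--     if y_ == max(reg_inside_y):
--       borne_mx_y = ix
--   return borne_mn_y,borne_mx_y
-- ===== SOURCE B (Python) =====
-- def min_max_reg(reg_unique_pair, reg_inside_y):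
--     if not reg_unique_pair:
--         return None, None
--     mn = min(reg_inside_y)
--     mx = max(reg_inside_y)
--     borne_mn_y = next((ix for ix in reversed(reg_unique_pair) if ix[0] == mn), None)
--     borne_mx_y = next((ix for ix in reversed(reg_unique_pair) if ix[0] == mx), None)
--     return borne_mn_y, borne_mx_y
-- ===== Notes on version B (the rewrite author's own statement) =====
-- stated objective: faster
-- what changed: Computes min/max of reg_inside_y once up front and picks each border by a backwards first-match search, instead of A's single forward loop that recomputes min and max of reg_inside_y for every pair while overwriting two accumulators.
import Mathlib
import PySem

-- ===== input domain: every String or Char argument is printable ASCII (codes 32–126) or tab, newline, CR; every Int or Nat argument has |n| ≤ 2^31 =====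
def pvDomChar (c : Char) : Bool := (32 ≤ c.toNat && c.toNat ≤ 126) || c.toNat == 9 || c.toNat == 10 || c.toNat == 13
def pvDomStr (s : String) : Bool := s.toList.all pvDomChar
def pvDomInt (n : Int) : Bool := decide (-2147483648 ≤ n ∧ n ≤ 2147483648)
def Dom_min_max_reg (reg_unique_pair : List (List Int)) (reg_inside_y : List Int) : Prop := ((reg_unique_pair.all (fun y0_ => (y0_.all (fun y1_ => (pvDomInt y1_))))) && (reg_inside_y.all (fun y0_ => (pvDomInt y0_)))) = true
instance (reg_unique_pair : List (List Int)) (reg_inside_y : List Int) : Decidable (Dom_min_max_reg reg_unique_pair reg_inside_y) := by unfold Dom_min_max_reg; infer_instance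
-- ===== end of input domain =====

-- ===== PORT A =====
-- B computes min/max once and does two backward first-match searches; objective: faster (min/max hoisted out of the loop).
-- Port of A: forward loop over pairs, recomputing min/max of reg_inside_y each step,
-- overwriting the two accumulators.  ix[0] is PySem.List.pyGet?; its .getD 0 default is
-- never reached inside Pre_ (every ix nonempty there).
def min_max_reg (reg_unique_pair : List (List Int)) (reg_inside_y : List Int) : Option (List Int) × Option (List Int) :=
  reg_unique_pair.foldl (fun (st : Option (List Int) × Option (List Int)) ix =>
    let y_ : Int := (PySem.List.pyGet? ix 0).getD 0
    let st1 := if some y_ = PySem.List.min? reg_inside_y (fun x => x) then (some ix, st.2) else st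
    if some y_ = PySem.List.max? reg_inside_y (fun x => x) then (st1.1, some ix) else st1)
    (none, none)

-- ===== PORT B =====
def min_max_reg_alt (reg_unique_pair : List (List Int)) (reg_inside_y : List Int) : Option (List Int) × Option (List Int) :=
  match reg_unique_pair with
  | [] => (none, none)
  | _ :: _ =>
    let mn : Int := (PySem.List.min? reg_inside_y (fun x => x)).getD 0
    let mx : Int := (PySem.List.max? reg_inside_y (fun x => x)).getD 0
    let borne_mn_y := reg_unique_pair.reverse.find? (fun ix => (PySem.List.pyGet? ix 0).getD 0 == mn)
    let borne_mx_y := reg_unique_pair.reverse.find? (fun ix => (PySem.List.pyGet? ix 0).getD 0 == mx)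
    (borne_mn_y, borne_mx_y)

-- ===== PRECONDITION & SPEC =====
-- Pre_ excludes exactly the inputs where A raises: a nonempty pair list with an empty
-- reg_inside_y (ValueError from min/max) or with some empty inner pair (IndexError on ix[0]).
def Pre_min_max_reg (reg_unique_pair : List (List Int)) (reg_inside_y : List Int) : Prop :=
  reg_unique_pair = [] ∨ (reg_inside_y ≠ [] ∧ ∀ ix ∈ reg_unique_pair, ix ≠ [])
instance (reg_unique_pair : List (List Int)) (reg_inside_y : List Int) : Decidable (Pre_min_max_reg reg_unique_pair reg_inside_y) := by unfold Pre_min_max_reg; infer_instance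
def pvWitness_min_max_reg : List (List Int) × List Int := ([[1, 2], [3, 4], [1, 5]], [1, 3, 2])
def Spec_min_max_reg (reg_unique_pair : List (List Int)) (reg_inside_y : List Int) (out : Option (List Int) × Option (List Int)) : Prop := out = min_max_reg_alt reg_unique_pair reg_inside_y
instance (reg_unique_pair : List (List Int)) (reg_inside_y : List Int) (out : Option (List Int) × Option (List Int)) : Decidable (Spec_min_max_reg reg_unique_pair reg_inside_y out) := by unfold Spec_min_max_reg; infer_instance

-- ===== CLAIM (what is proved, stated in full; the proofs are below) =====
def Claim_equal_min_max_reg : Prop := ∀ (reg_unique_pair : List (List Int)) (reg_inside_y : List Int), Dom_min_max_reg reg_unique_pair reg_inside_y → Pre_min_max_reg reg_unique_pair reg_inside_y → Spec_min_max_reg reg_unique_pair reg_inside_y (min_max_reg reg_unique_pair reg_inside_y)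

-- ===== LEMMAS AND PROOFS =====

-- last-match fold = first match on the reversed list
theorem foldl_lastMatch {a : Type} (p : a → Bool) (xs : List a) (init : Option a) :
    xs.foldl (fun acc x => if p x then some x else acc) init
      = ((xs.reverse.find? p).elim init some) := by
  induction xs generalizing init with
  | nil => simp
  | cons x t ih =>
      simp only [List.foldl_cons, ih, List.reverse_cons, List.find?_append]
      cases h : t.reverse.find? p
      · by_cases hp : p x <;> simp [hp, List.find?]
      · simp

-- A's paired fold splits into two independent one-accumulator folds
theorem min_max_reg_eq_pair (reg_unique_pair : List (List Int)) (reg_inside_y : List Int) :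
    min_max_reg reg_unique_pair reg_inside_y
      = (reg_unique_pair.foldl (fun acc ix =>
            if some ((PySem.List.pyGet? ix 0).getD 0) = PySem.List.min? reg_inside_y (fun x => x) then some ix else acc) none,
         reg_unique_pair.foldl (fun acc ix =>
            if some ((PySem.List.pyGet? ix 0).getD 0) = PySem.List.max? reg_inside_y (fun x => x) then some ix else acc) none) := by
  unfold min_max_reg
  have hstep : (fun (st : Option (List Int) × Option (List Int)) (ix : List Int) =>
        let y_ : Int := (PySem.List.pyGet? ix 0).getD 0
        let st1 := if some y_ = PySem.List.min? reg_inside_y (fun x => x) then (some ix, st.2) else st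
        if some y_ = PySem.List.max? reg_inside_y (fun x => x) then (st1.1, some ix) else st1)
      = (fun (st : Option (List Int) × Option (List Int)) (ix : List Int) =>
        (if some ((PySem.List.pyGet? ix 0).getD 0) = PySem.List.min? reg_inside_y (fun x => x) then some ix else st.1,
         if some ((PySem.List.pyGet? ix 0).getD 0) = PySem.List.max? reg_inside_y (fun x => x) then some ix else st.2)) := by
    funext st ix
    simp only
    split_ifs <;> rfl
  rw [hstep]
  exact PySem.List.foldl_prod_mk
    (fun acc ix => if some ((PySem.List.pyGet? ix 0).getD 0) = PySem.List.min? reg_inside_y (fun x => x) then some ix else acc)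
    (fun acc ix => if some ((PySem.List.pyGet? ix 0).getD 0) = PySem.List.max? reg_inside_y (fun x => x) then some ix else acc)
    reg_unique_pair none none

-- one component: the selection fold equals B's backward first-match, given the extremal value
theorem component_eq (pairs : List (List Int)) (v : Int) :
    pairs.foldl (fun acc ix =>
        if some ((PySem.List.pyGet? ix 0).getD 0) = some v then some ix else acc) none
      = pairs.reverse.find? (fun ix => (PySem.List.pyGet? ix 0).getD 0 == v) := by
  have h := foldl_lastMatch (fun ix : List Int => (PySem.List.pyGet? ix 0).getD 0 == v) pairs none
  simp only [beq_iff_eq, Option.some.injEq] at h ⊢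
  rw [h]
  cases pairs.reverse.find? (fun ix => (PySem.List.pyGet? ix 0).getD 0 == v) <;> rfl

-- ===== VERDICT (by name: the statement is the Claim_ definition above) =====
theorem min_max_reg_spec : Claim_equal_min_max_reg := by
  intro pairs ys _ hpre
  unfold Spec_min_max_reg
  rw [min_max_reg_eq_pair]
  cases pairs with
  | nil => simp [min_max_reg_alt]
  | cons p t =>
      rcases hpre with h | ⟨hy, _⟩
      · exact absurd h (by simp)
      · obtain ⟨y0, ys', rfl⟩ : ∃ y0 ys', ys = y0 :: ys' := by
          cases ys with
          | nil => exact absurd rfl hy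
          | cons a b => exact ⟨a, b, rfl⟩
        unfold min_max_reg_alt
        simp only [PySem.List.min?_id_cons, PySem.List.max?_id_cons, Option.getD_some]
        rw [component_eq, component_eq]
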